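-- pv_equiv track=rewrite | github.com/Brancosa/Trabajo_HPC | python/epidemia.py | paso_simulacion
-- ===== SOURCE A (Python) =====
-- SUSCEPTIBLE = "S"
--
-- INFECTED = "I"
--
-- def paso_simulacion(poblacion):
--     nueva_poblacion = poblacion.copy()
--     for i, estado in enumerate(poblacion):
--         if estado == INFECTED:
--             vecinos = [i - 1, i + 1]
--             for v in vecinos:
--                 if 0 <= v < len(poblacion) and poblacion[v] == SUSCEPTIBLE:
--                     nueva_poblacion[v] = INFECTED
--     return nueva_poblacion
-- ===== SOURCE B (Python) =====
-- SUSCEPTIBLE = "S"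
-- INFECTED = "I"
--
-- def paso_simulacion(poblacion):
--     n = len(poblacion)
--     return [
--         INFECTED
--         if poblacion[i] == SUSCEPTIBLE
--         and ((i > 0 and poblacion[i - 1] == INFECTED)
--              or (i + 1 < n and poblacion[i + 1] == INFECTED))
--         else poblacion[i]
--         for i in range(n)
--     ]
-- ===== Notes on version B (the rewrite author's own statement) =====
-- stated objective: idiomatic
-- what changed: Replaced A's push-style mutation (each infected cell writes INFECTED into its susceptible neighbors in a copy) by a pull-style list comprehension that computes each new cell directly from its old neighbors.
import Mathlib
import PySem

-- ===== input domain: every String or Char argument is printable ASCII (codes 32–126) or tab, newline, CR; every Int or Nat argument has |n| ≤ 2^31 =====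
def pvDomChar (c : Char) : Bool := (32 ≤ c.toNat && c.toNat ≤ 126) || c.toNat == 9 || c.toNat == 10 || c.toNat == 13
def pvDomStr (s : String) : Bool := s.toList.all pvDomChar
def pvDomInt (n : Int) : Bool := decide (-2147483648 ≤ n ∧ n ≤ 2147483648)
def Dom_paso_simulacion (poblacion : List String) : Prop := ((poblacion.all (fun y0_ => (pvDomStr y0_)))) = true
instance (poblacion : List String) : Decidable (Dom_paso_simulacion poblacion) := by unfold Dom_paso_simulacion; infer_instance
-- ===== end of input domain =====

-- B replaces A's push-style mutation of a copy by a pull-style per-cell computation (idiomatic comprehension); return values agree on all inputs.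

-- ===== PORT A =====
-- write "I" at index v of nv when v is in range and poblacion[v] == "S"
def pasoWrite (poblacion : List String) (nv : List String) (v : Int) : List String :=
  if 0 ≤ v ∧ v < (poblacion.length : Int) ∧ PySem.List.pyGet? poblacion v = some "S" then
    nv.set v.toNat "I"
  else nv

-- one iteration of A's outer loop: an infected cell i pushes to neighbors i-1, i+1
def pasoStep (poblacion : List String) (nueva : List String) (p : Int × String) : List String :=
  if p.2 = "I" then List.foldl (pasoWrite poblacion) nueva [p.1 - 1, p.1 + 1] else nueva

def paso_simulacion (poblacion : List String) : List String :=
  List.foldl (pasoStep poblacion) poblacion (PySem.List.enumerate poblacion 0)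

-- ===== PORT B =====
def paso_simulacion_alt (poblacion : List String) : List String :=
  (List.range poblacion.length).map fun i =>
    if poblacion.getD i "" = "S" ∧
        ((0 < i ∧ poblacion.getD (i - 1) "" = "I") ∨
         (i + 1 < poblacion.length ∧ poblacion.getD (i + 1) "" = "I")) then "I"
    else poblacion.getD i ""

-- ===== PRECONDITION & SPEC =====
def Spec_paso_simulacion (poblacion : List String) (out : List String) : Prop := out = paso_simulacion_alt poblacion
instance (poblacion : List String) (out : List String) : Decidable (Spec_paso_simulacion poblacion out) := by unfold Spec_paso_simulacion; infer_instance

-- ===== CLAIM (what is proved, stated in full; the proofs are below) =====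
def Claim_equal_paso_simulacion : Prop := ∀ (poblacion : List String), Dom_paso_simulacion poblacion → Spec_paso_simulacion poblacion (paso_simulacion poblacion)

-- ===== LEMMAS AND PROOFS =====

-- whether A's write at Int index v hits Nat position j
def hitsB (pob : List String) (v : Int) (j : Nat) : Bool :=
  decide (0 ≤ v ∧ v < (pob.length : Int) ∧ PySem.List.pyGet? pob v = some "S") && (v == (j : Int))

theorem length_pasoWrite (pob nv : List String) (v : Int) (h : nv.length = pob.length) :
    (pasoWrite pob nv v).length = pob.length := by
  unfold pasoWrite; split_ifs <;> simp [h]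

theorem length_pasoStep (pob nv : List String) (p : Int × String) (h : nv.length = pob.length) :
    (pasoStep pob nv p).length = pob.length := by
  unfold pasoStep; split_ifs with h1
  · simp [List.foldl]
    exact length_pasoWrite _ _ _ (length_pasoWrite _ _ _ h)
  · exact h

theorem length_fold (pob : List String) (l : List (Int × String)) (s0 : List String)
    (h : s0.length = pob.length) :
    (List.foldl (pasoStep pob) s0 l).length = pob.length := by
  induction l generalizing s0 with
  | nil => simpa using h
  | cons p l ih => exact ih _ (length_pasoStep _ _ _ h)

theorem getElem?_pasoWrite (pob nv : List String) (v : Int) (j : Nat)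
    (h : nv.length = pob.length) :
    (pasoWrite pob nv v)[j]? = if hitsB pob v j then some "I" else nv[j]? := by
  unfold pasoWrite hitsB
  by_cases hc : 0 ≤ v ∧ v < (pob.length : Int) ∧ PySem.List.pyGet? pob v = some "S"
  · rw [if_pos hc]
    by_cases hvj : v = (j : Int)
    · have hj : j < nv.length := by have := hc.2.1; omega
      have hvt : v.toNat = j := by omega
      have hb : (decide (0 ≤ v ∧ v < (pob.length : Int) ∧ PySem.List.pyGet? pob v = some "S")
          && (v == (j : Int))) = true := by rw [decide_eq_true hc]; simp [hvj]
      rw [if_pos hb, hvt]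
      simp [List.getElem?_set, hj]
    · have hne : v.toNat ≠ j := by omega
      simp [hc, hvj, List.getElem?_set, hne]
  · rw [if_neg hc]; simp [hc]

theorem getElem?_pasoStep (pob nv : List String) (p : Int × String) (j : Nat)
    (h : nv.length = pob.length) :
    (pasoStep pob nv p)[j]? =
      if p.2 = "I" ∧ (hitsB pob (p.1 - 1) j ∨ hitsB pob (p.1 + 1) j) then some "I"
      else nv[j]? := by
  unfold pasoStep
  split_ifs with h1 h2 h2
  · simp only [List.foldl]
    rcases h2.2 with hh | hh
    · rw [getElem?_pasoWrite _ _ _ _ (length_pasoWrite _ _ _ h)]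
      by_cases hh2 : hitsB pob (p.1 + 1) j
      · simp [hh2]
      · simp [hh2, getElem?_pasoWrite _ _ _ _ h, hh]
    · simp [List.foldl, getElem?_pasoWrite _ _ _ _ (length_pasoWrite _ _ _ h), hh]
  · simp only [List.foldl]
    push_neg at h2
    have hh := h2 h1
    rw [getElem?_pasoWrite _ _ _ _ (length_pasoWrite _ _ _ h)]
    simp [hh.2, getElem?_pasoWrite _ _ _ _ h, hh.1]
  · exact absurd h2.1 h1
  · rfl

theorem getElem?_fold (pob : List String) (l : List (Int × String)) (s0 : List String) (j : Nat)
    (h : s0.length = pob.length) :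
    (List.foldl (pasoStep pob) s0 l)[j]? =
      if l.any (fun p => p.2 = "I" ∧ (hitsB pob (p.1 - 1) j ∨ hitsB pob (p.1 + 1) j)) then some "I"
      else s0[j]? := by
  induction l generalizing s0 with
  | nil => simp
  | cons p l ih =>
    simp only [List.foldl, List.any_cons]
    rw [ih _ (length_pasoStep _ _ _ h), getElem?_pasoStep _ _ _ _ h]
    by_cases hp : p.2 = "I" ∧ (hitsB pob (p.1 - 1) j = true ∨ hitsB pob (p.1 + 1) j = true)
    · rw [if_pos hp]
      have hc : (decide (p.2 = "I" ∧ (hitsB pob (p.1 - 1) j = true ∨ hitsB pob (p.1 + 1) j = true))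
          || l.any fun p => decide (p.2 = "I" ∧ (hitsB pob (p.1 - 1) j = true ∨ hitsB pob (p.1 + 1) j = true))) = true := by
        rw [decide_eq_true hp]; simp
      rw [if_pos hc]
      split <;> rfl
    · rw [if_neg hp]
      simp only [decide_eq_false hp, Bool.false_or]

-- the infection condition at position j, as B computes it
theorem infect_iff (pob : List String) (j : Nat) (hj : j < pob.length) :
    ((PySem.List.enumerate pob 0).any
        (fun p => p.2 = "I" ∧ (hitsB pob (p.1 - 1) j ∨ hitsB pob (p.1 + 1) j)) = true) ↔
      (pob.getD j "" = "S" ∧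
        ((0 < j ∧ pob.getD (j - 1) "" = "I") ∨
         (j + 1 < pob.length ∧ pob.getD (j + 1) "" = "I"))) := by
  rw [List.any_eq_true]
  constructor
  · rintro ⟨p, hp, hcond⟩
    rw [PySem.List.mem_enumerate_iff] at hp
    obtain ⟨k, hk, rfl⟩ := hp
    simp only [decide_eq_true_eq] at hcond
    obtain ⟨hI, hhit⟩ := hcond
    simp only [hitsB, Bool.and_eq_true, decide_eq_true_eq, beq_iff_eq] at hhit
    rcases hhit with ⟨⟨hn1, hn2, hS⟩, heq⟩ | ⟨⟨hn1, hn2, hS⟩, heq⟩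
    · -- 0 + k - 1 = j  →  k = j + 1
      have hkj : k = j + 1 := by omega
      subst hkj
      rw [heq, PySem.List.pyGet?_natCast] at hS
      rw [List.getElem?_eq_getElem hj] at hS
      have hS' : pob[j] = "S" := by exact Option.some.inj hS
      have hkl : j + 1 < pob.length := by omega
      refine ⟨by simp [List.getD, List.getElem?_eq_getElem hj, hS'], Or.inr ⟨hkl, ?_⟩⟩
      have hI' : pob[j + 1] = "I" := by simpa using hI
      simp [List.getD, List.getElem?_eq_getElem hkl, hI']
    · -- 0 + k + 1 = j  →  k = j - 1, j > 0
      have hj0 : 0 < j := by omega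
      have hkj : k = j - 1 := by omega
      subst hkj
      rw [heq, PySem.List.pyGet?_natCast] at hS
      rw [List.getElem?_eq_getElem hj] at hS
      have hS' : pob[j] = "S" := by exact Option.some.inj hS
      have hkl : j - 1 < pob.length := by omega
      refine ⟨by simp [List.getD, List.getElem?_eq_getElem hj, hS'], Or.inl ⟨hj0, ?_⟩⟩
      have hI' : pob[j - 1] = "I" := by simpa using hI
      simp [List.getD, List.getElem?_eq_getElem hkl, hI']
  · rintro ⟨hS, hnb⟩
    have hS' : pob[j] = "S" := by
      simpa [List.getD, List.getElem?_eq_getElem hj] using hS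
    have hSj : PySem.List.pyGet? pob ((j : Nat) : Int) = some "S" := by
      rw [PySem.List.pyGet?_natCast, List.getElem?_eq_getElem hj, hS']
    rcases hnb with ⟨hj0, hI⟩ | ⟨hjn, hI⟩
    · -- infected at j-1 pushes right via its neighbor k+1 = j
      have hk : j - 1 < pob.length := by omega
      have hI' : pob[j - 1] = "I" := by
        simpa [List.getD, List.getElem?_eq_getElem hk] using hI
      refine ⟨((0 : Int) + ((j - 1 : Nat) : Int), pob[j - 1]), ?_, ?_⟩
      · rw [PySem.List.mem_enumerate_iff]
        exact ⟨j - 1, hk, rfl⟩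
      · simp only [decide_eq_true_eq]
        refine ⟨hI', Or.inr ?_⟩
        have e : (0 : Int) + ((j - 1 : Nat) : Int) + 1 = ((j : Nat) : Int) := by omega
        simp only [hitsB, e, Bool.and_eq_true, decide_eq_true_eq, beq_iff_eq]
        exact ⟨⟨by omega, by exact_mod_cast hj, hSj⟩, trivial⟩
    · -- infected at j+1 pushes left via its neighbor k-1 = j
      have hk : j + 1 < pob.length := hjn
      have hI' : pob[j + 1] = "I" := by
        simpa [List.getD, List.getElem?_eq_getElem hk] using hI
      refine ⟨((0 : Int) + ((j + 1 : Nat) : Int), pob[j + 1]), ?_, ?_⟩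
      · rw [PySem.List.mem_enumerate_iff]
        exact ⟨j + 1, hk, rfl⟩
      · simp only [decide_eq_true_eq]
        refine ⟨hI', Or.inl ?_⟩
        have e : (0 : Int) + ((j + 1 : Nat) : Int) - 1 = ((j : Nat) : Int) := by omega
        simp only [hitsB, e, Bool.and_eq_true, decide_eq_true_eq, beq_iff_eq]
        exact ⟨⟨by omega, by exact_mod_cast hj, hSj⟩, trivial⟩

theorem length_alt (pob : List String) : (paso_simulacion_alt pob).length = pob.length := by
  unfold paso_simulacion_alt; simp

theorem getElem?_alt (pob : List String) (j : Nat) (hj : j < pob.length) :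
    (paso_simulacion_alt pob)[j]? =
      some (if pob.getD j "" = "S" ∧
        ((0 < j ∧ pob.getD (j - 1) "" = "I") ∨
         (j + 1 < pob.length ∧ pob.getD (j + 1) "" = "I")) then "I" else pob.getD j "") := by
  unfold paso_simulacion_alt
  simp [List.getElem?_map, List.getElem?_range, hj]

-- ===== VERDICT (by name: the statement is the Claim_ definition above) =====
theorem paso_simulacion_spec : Claim_equal_paso_simulacion := by
  intro pob _
  unfold Spec_paso_simulacion
  apply List.ext_getElem?
  intro j
  by_cases hj : j < pob.length
  · rw [getElem?_alt pob j hj]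
    unfold paso_simulacion
    rw [getElem?_fold pob _ pob j rfl]
    by_cases hE : (PySem.List.enumerate pob 0).any
        (fun p => p.2 = "I" ∧ (hitsB pob (p.1 - 1) j ∨ hitsB pob (p.1 + 1) j)) = true
    · rw [if_pos hE]
      rw [if_pos ((infect_iff pob j hj).mp hE)]
    · rw [if_neg (by simpa using hE)]
      have := (infect_iff pob j hj).not.mp (by simpa using hE)
      rw [if_neg this]
      simp [List.getD, List.getElem?_eq_getElem hj]
  · have h1 : (paso_simulacion pob)[j]? = none := by
      apply List.getElem?_eq_none
      unfold paso_simulacion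
      rw [length_fold pob _ pob rfl]; omega
    have h2 : (paso_simulacion_alt pob)[j]? = none := by
      apply List.getElem?_eq_none
      rw [length_alt]; omega
    rw [h1, h2]
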